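-- pv_equiv track=rewrite | github.com/vineshr4/2021-Datathon-Bloomberg | analysis.py | topic_frequency
-- ===== SOURCE A (Python) =====
-- def topic_frequency(clustered_topics):
--     all_topics = []
--     all_frequency = []
--     num_clusters = len(clustered_topics)
--     for i in range(0, num_clusters):
--         curr_topics = clustered_topics[i]
--         topics = []
--         frequencies = []
--         for j in range(0, len(curr_topics)):
--             if curr_topics[j] not in topics:
--                 topics.append(curr_topics[j])
--                 frequencies.append(curr_topics.count(curr_topics[j]))
--
--         s = [x for _, x in sorted(zip(frequencies, topics), reverse=True)]
--         frequencies.sort(reverse=True)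
--
--         all_topics.append(s)
--         all_frequency.append(frequencies)
--
--     return all_topics, all_frequency
-- ===== SOURCE B (Python) =====
-- def topic_frequency(clustered_topics):
--     all_topics = []
--     all_frequency = []
--     for curr_topics in clustered_topics:
--         # group runs of equal topics in one linear pass over the sorted cluster
--         pairs = []
--         prev = None
--         run = 0
--         for t in sorted(curr_topics):
--             if prev is not None and t == prev:
--                 run += 1
--             else:
--                 if prev is not None:
--                     pairs.append((run, prev))
--                 prev = t
--                 run = 1
--         if prev is not None:
--             pairs.append((run, prev))
--         pairs.sort(reverse=True)
--         all_topics.append([t for _, t in pairs])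
--         all_frequency.append([f for f, _ in pairs])
--     return all_topics, all_frequency
-- ===== Notes on version B (the rewrite author's own statement) =====
-- stated objective: faster
-- what changed: B sorts each cluster once and groups adjacent equal topics in a single linear run-length pass (sort-then-groupby), producing (count, topic) pairs that are sorted reverse and unzipped, instead of A's per-topic membership scan plus a full .count scan and two separate sorts.
import Mathlib
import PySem

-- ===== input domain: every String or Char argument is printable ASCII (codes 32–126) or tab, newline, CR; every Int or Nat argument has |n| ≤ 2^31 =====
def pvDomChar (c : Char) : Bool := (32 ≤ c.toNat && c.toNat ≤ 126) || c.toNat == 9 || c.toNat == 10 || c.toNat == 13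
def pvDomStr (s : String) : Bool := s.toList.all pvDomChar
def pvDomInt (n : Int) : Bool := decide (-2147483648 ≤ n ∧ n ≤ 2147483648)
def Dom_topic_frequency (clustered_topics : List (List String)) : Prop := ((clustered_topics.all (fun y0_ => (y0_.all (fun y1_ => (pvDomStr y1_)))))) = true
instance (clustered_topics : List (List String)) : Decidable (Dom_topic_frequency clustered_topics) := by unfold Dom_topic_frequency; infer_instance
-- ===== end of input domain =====

-- B sorts each cluster once and groups adjacent equal topics in one linear run-length pass,
-- replacing A's quadratic membership + .count scans and its two separate sorts (objective: faster).

-- ===== PORT A =====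
-- inner dedup-and-count loop body: 'if curr_topics[j] not in topics: append topic and its count'
def tfA_step (curr_topics : List String) (p : List String × List Int) (x : String) :
    List String × List Int :=
  if x ∈ p.1 then p
  else (p.1 ++ [x], p.2 ++ [(PySem.List.count curr_topics x : Int)])

-- 'for j in range(0, len(curr_topics)): …' producing (topics, frequencies)
def tfA_inner (curr_topics : List String) : List String × List Int :=
  (PySem.List.pyRange 0 (PySem.List.len curr_topics)).foldl
    (fun p j => tfA_step curr_topics p (PySem.List.pyGetD curr_topics j "")) ([], [])

-- one iteration of the outer loop: append s and the descending-sorted frequencies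
def tfA_body (acc : List (List String) × List (List Int)) (curr_topics : List String) :
    List (List String) × List (List Int) :=
  (acc.1 ++ [(PySem.List.sorted2 ((tfA_inner curr_topics).2.zip (tfA_inner curr_topics).1)
                Prod.fst Prod.snd true).map Prod.snd],
   acc.2 ++ [PySem.List.sorted (tfA_inner curr_topics).2 (fun x => x) true])

def topic_frequency (clustered_topics : List (List String)) : List (List String) × List (List Int) :=
  (PySem.List.pyRange 0 (PySem.List.len clustered_topics)).foldl
    (fun acc i => tfA_body acc (PySem.List.pyGetD clustered_topics i [])) ([], [])

-- ===== PORT B =====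
-- loop body of 'for t in sorted(curr_topics)': state = (pairs, prev, run)
def tfB_step (st : List (Int × String) × Option String × Int) (t : String) :
    List (Int × String) × Option String × Int :=
  match st with
  | (pairs, some p, run) =>
      if t = p then (pairs, some p, run + 1) else (pairs ++ [(run, p)], some t, 1)
  | (pairs, none, _) => (pairs, some t, 1)

-- the trailing 'if prev is not None: pairs.append((run, prev))'
def tfB_flush (st : List (Int × String) × Option String × Int) : List (Int × String) :=
  match st with
  | (pairs, some p, run) => pairs ++ [(run, p)]
  | (pairs, none, _) => pairs

-- the run-length pairs of one cluster
def tfB_group (curr_topics : List String) : List (Int × String) :=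
  tfB_flush ((PySem.List.sorted curr_topics (fun x => x) false).foldl tfB_step ([], none, 0))

-- one cluster: reverse-sort the (run, topic) pairs, then unzip
def tfB_body (acc : List (List String) × List (List Int)) (curr_topics : List String) :
    List (List String) × List (List Int) :=
  (acc.1 ++ [(PySem.List.sorted2 (tfB_group curr_topics) Prod.fst Prod.snd true).map Prod.snd],
   acc.2 ++ [(PySem.List.sorted2 (tfB_group curr_topics) Prod.fst Prod.snd true).map Prod.fst])

def topic_frequency_alt (clustered_topics : List (List String)) : List (List String) × List (List Int) :=
  clustered_topics.foldl tfB_body ([], [])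

-- ===== PRECONDITION & SPEC =====
def Spec_topic_frequency (clustered_topics : List (List String)) (out : List (List String) × List (List Int)) : Prop := out = topic_frequency_alt clustered_topics
instance (clustered_topics : List (List String)) (out : List (List String) × List (List Int)) : Decidable (Spec_topic_frequency clustered_topics out) := by unfold Spec_topic_frequency; infer_instance

-- ===== CLAIM (what is proved, stated in full; the proofs are below) =====
def Claim_equal_topic_frequency : Prop := ∀ (clustered_topics : List (List String)), Dom_topic_frequency clustered_topics → Spec_topic_frequency clustered_topics (topic_frequency clustered_topics)

-- ===== LEMMAS AND PROOFS =====

-- the descending lexicographic order on (frequency, topic) pairs that reverse sorted2 produces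
def tfR (a b : Int × String) : Prop := b.1 < a.1 ∨ (¬ a.1 < b.1 ∧ b.2 ≤ a.2)

lemma tfR_antisymm (a b : Int × String) (h1 : tfR a b) (h2 : tfR b a) : a = b := by
  rcases h1 with h1 | ⟨h1a, h1b⟩ <;> rcases h2 with h2 | ⟨h2a, h2b⟩
  · exact absurd h2 (lt_asymm h1)
  · exact absurd h1 h2a
  · exact absurd h2 h1a
  · exact Prod.ext (le_antisymm (le_of_not_gt h2a) (le_of_not_gt h1a)) (le_antisymm h2b h1b)

lemma tfR_trans {a b c : Int × String} (h1 : tfR a b) (h2 : tfR b c) : tfR a c := by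
  rcases h1 with h1 | ⟨h1a, h1b⟩ <;> rcases h2 with h2 | ⟨h2a, h2b⟩
  · exact Or.inl (lt_trans h2 h1)
  · exact Or.inl (lt_of_le_of_lt (le_of_not_gt h2a) h1)
  · exact Or.inl (lt_of_lt_of_le h2 (le_of_not_gt h1a))
  · exact Or.inr ⟨fun h => h1a (lt_of_lt_of_le h (le_of_not_gt h2a)), le_trans h2b h1b⟩

-- insertBy keeps a Pairwise invariant when `before` decides it on both sides
lemma insertBy_pairwise_R {α : Type} (R : α → α → Prop) (before : α → α → Bool)
    (hbt : ∀ a b, before a b = true → R a b) (hbf : ∀ a b, before a b = false → R b a)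
    (htr : ∀ {a b c}, R a b → R b c → R a c)
    (x : α) (ys : List α) (h : ys.Pairwise R) :
    (PySem.List.insertBy before x ys).Pairwise R := by
  induction ys with
  | nil => simp [PySem.List.insertBy]
  | cons y t ih =>
    rcases List.pairwise_cons.mp h with ⟨hy, ht⟩
    by_cases hb : before x y = true
    · simp only [PySem.List.insertBy, hb, if_true]
      refine List.pairwise_cons.mpr ⟨?_, h⟩
      intro z hz
      rcases List.mem_cons.mp hz with rfl | hz
      · exact hbt _ _ hb
      · exact htr (hbt _ _ hb) (hy z hz)
    · simp only [PySem.List.insertBy, hb]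
      refine List.pairwise_cons.mpr ⟨?_, ih ht⟩
      intro z hz
      rcases (PySem.List.insertBy_mem_iff before x z t).mp hz with rfl | hz
      · exact hbf _ _ (by simpa using hb)
      · exact hy z hz

lemma foldl_insertBy_pairwise {α : Type} (R : α → α → Prop) (before : α → α → Bool)
    (hbt : ∀ a b, before a b = true → R a b) (hbf : ∀ a b, before a b = false → R b a)
    (htr : ∀ {a b c}, R a b → R b c → R a c)
    (xs : List α) : ∀ (acc : List α), acc.Pairwise R →
      (xs.foldl (fun acc x => PySem.List.insertBy before x acc) acc).Pairwise R := by
  induction xs with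
  | nil => intro acc h; simpa using h
  | cons x t ih =>
    intro acc h
    exact ih _ (insertBy_pairwise_R R before hbt hbf htr x acc h)

-- reverse sorted2 on (Int, String) pairs is Pairwise in the descending lex order tfR
lemma sorted2_rev_pairwise_lex (xs : List (Int × String)) :
    (PySem.List.sorted2 xs Prod.fst Prod.snd true).Pairwise tfR := by
  simp only [PySem.List.sorted2]
  refine foldl_insertBy_pairwise tfR _ ?_ ?_ (fun h1 h2 => tfR_trans h1 h2) xs [] (by simp)
  · intro a b hab
    rcases Bool.or_eq_true_iff.mp hab with h | h
    · exact Or.inl (of_decide_eq_true h)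
    · rcases Bool.and_eq_true_iff.mp h with ⟨h1, h2⟩
      exact Or.inr ⟨by simpa using h1, le_of_lt (of_decide_eq_true h2)⟩
  · intro a b hab
    rcases Bool.or_eq_false_iff.mp hab with ⟨h1, h2⟩
    rcases Bool.and_eq_false_iff.mp h2 with h3 | h3
    · exact Or.inl (by simpa using h3)
    · exact Or.inr ⟨by simpa using h1, le_of_not_gt (by simpa using h3)⟩

-- a reverse sorted2 of (frequency, topic) pairs depends only on the multiset of pairs
lemma sorted2_rev_eq_of_perm (xs ys : List (Int × String)) (h : xs.Perm ys) :
    PySem.List.sorted2 xs Prod.fst Prod.snd true = PySem.List.sorted2 ys Prod.fst Prod.snd true := by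
  refine List.Perm.eq_of_pairwise (fun a b _ _ h1 h2 => tfR_antisymm a b h1 h2)
    (sorted2_rev_pairwise_lex xs) (sorted2_rev_pairwise_lex ys) ?_
  exact ((PySem.List.sorted2_perm xs Prod.fst Prod.snd true).trans h).trans
    (PySem.List.sorted2_perm ys Prod.fst Prod.snd true).symm

-- the primary key of a reverse two-key sort is descending
lemma sorted2_rev_pairwise_fst {α : Type} (xs : List α) (k1 : α → Int) (k2 : α → String) :
    (PySem.List.sorted2 xs k1 k2 true).Pairwise (fun a b => k1 b ≤ k1 a) := by
  simp only [PySem.List.sorted2]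
  refine foldl_insertBy_pairwise _ _ ?_ ?_ ?_ xs [] (by simp)
  · intro a b hab
    rcases Bool.or_eq_true_iff.mp hab with h | h
    · exact le_of_lt (of_decide_eq_true h)
    · have h1 : ¬ (k1 a < k1 b) := by
        rcases Bool.and_eq_true_iff.mp h with ⟨h1, _⟩
        simpa using h1
      exact le_of_not_gt h1
  · intro a b hab
    have h1 : ¬ (k1 b < k1 a) := by
      intro hlt
      simp [hlt] at hab
    exact le_of_not_gt h1
  · exact fun h1 h2 => le_trans h2 h1

-- A's dedup-and-count loop computes (ofList c, counts of ofList c)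
lemma loopA (c : List String) (l : List String) : ∀ ts : List String,
    l.foldl (fun (p : List String × List Int) x =>
        if x ∈ p.1 then p
        else (p.1 ++ [x], p.2 ++ [(PySem.List.count c x : Int)]))
      (ts, ts.map (fun t => (PySem.List.count c t : Int)))
    = (l.foldl PySem.Set.add ts,
       (l.foldl PySem.Set.add ts).map (fun t => (PySem.List.count c t : Int))) := by
  induction l with
  | nil => intro ts; rfl
  | cons x l ih =>
    intro ts
    by_cases hx : x ∈ ts
    · simpa [List.foldl_cons, hx, PySem.Set.add, List.elem_iff] using ih ts
    · have : PySem.Set.add ts x = ts ++ [x] := by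
        simp [PySem.Set.add, hx]
      simpa [List.foldl_cons, hx, this, List.map_append] using ih (ts ++ [x])

-- descending sort of the frequency list is the fst-projection of the reverse-sorted pair list
lemma freq_eq (S : List String) (f : String → Int) :
    PySem.List.sorted (S.map f) (fun x => x) true
      = (PySem.List.sorted2 (S.map (fun t => (f t, t))) Prod.fst Prod.snd true).map Prod.fst := by
  apply PySem.List.eq_of_perm_of_pairwise_le_of_injective (fun x : Int => -x) neg_injective
  · refine (PySem.List.sorted_perm _ _ _).trans ?_
    have h2 := ((PySem.List.sorted2_perm (S.map (fun t => (f t, t))) Prod.fst Prod.snd true).map Prod.fst)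
    rw [List.map_map] at h2
    exact h2.symm
  · exact (PySem.List.sorted_pairwise_rev (S.map f) (fun x => x)).imp (fun h => neg_le_neg h)
  · exact List.pairwise_map.mpr
      ((sorted2_rev_pairwise_fst (S.map (fun t => (f t, t))) Prod.fst Prod.snd).imp
        (fun h => neg_le_neg h))

-- Set.add skips elements already in the accumulator
lemma foldl_add_cons (l : List String) : ∀ (x : String) (acc : List String), x ∉ l →
    l.foldl PySem.Set.add (x :: acc) = x :: l.foldl PySem.Set.add acc := by
  induction l with
  | nil => intro x acc _; rfl
  | cons y t ih =>
    intro x acc hx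
    have hyx : y ≠ x := fun h => hx (h ▸ List.mem_cons_self)
    have hxt : x ∉ t := fun h => hx (List.mem_cons_of_mem _ h)
    by_cases hy : y ∈ acc
    · have h1 : PySem.Set.add (x :: acc) y = x :: acc := by
        simp [PySem.Set.add, List.mem_cons, hy]
      have h2 : PySem.Set.add acc y = acc := by simp [PySem.Set.add, hy]
      simp only [List.foldl_cons, h1, h2]
      exact ih x acc hxt
    · have h1 : PySem.Set.add (x :: acc) y = x :: (acc ++ [y]) := by
        simp [PySem.Set.add, List.mem_cons, hy, hyx]
      have h2 : PySem.Set.add acc y = acc ++ [y] := by simp [PySem.Set.add, hy]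
      simp only [List.foldl_cons, h1, h2]
      exact ih x (acc ++ [y]) hxt

lemma ofList_cons_not_mem (x : String) (l : List String) (hx : x ∉ l) :
    PySem.Set.ofList (x :: l) = x :: PySem.Set.ofList l := by
  show (x :: l).foldl PySem.Set.add [] = x :: l.foldl PySem.Set.add []
  have h1 : PySem.Set.add [] x = [x] := rfl
  simp only [List.foldl_cons, h1]
  exact foldl_add_cons l x [] hx

lemma ofList_cons_dup (x : String) (l : List String) :
    PySem.Set.ofList (x :: x :: l) = PySem.Set.ofList (x :: l) := by
  show (x :: x :: l).foldl PySem.Set.add [] = (x :: l).foldl PySem.Set.add []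
  have h1 : PySem.Set.add [] x = [x] := rfl
  have h2 : PySem.Set.add [x] x = [x] := by simp [PySem.Set.add]
  simp only [List.foldl_cons, h1, h2]

-- the grouping loop over a sorted remainder, with an open run (p, k)
lemma grp_loop : ∀ (s : List String) (acc : List (Int × String)) (p : String) (k : Int),
    s.Pairwise (· ≤ ·) → (∀ x ∈ s, p ≤ x) →
    tfB_flush (s.foldl tfB_step (acc, some p, k))
      = acc ++ (PySem.Set.ofList (p :: s)).map
          (fun t => ((if t = p then k else 0) + (PySem.List.count s t : Int), t)) := by
  intro s
  induction s with
  | nil =>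
    intro acc p k _ _
    simp [tfB_flush, PySem.Set.ofList, PySem.Set.add, PySem.List.count]
  | cons x rest ih =>
    intro acc p k hpw hge
    rcases List.pairwise_cons.mp hpw with ⟨hx, hrest⟩
    by_cases hxp : x = p
    · subst hxp
      have hstep : tfB_step (acc, some x, k) x = (acc, some x, k + 1) := by
        simp [tfB_step]
      rw [List.foldl_cons, hstep, ih acc x (k + 1) hrest hx, ofList_cons_dup]
      congr 1
      apply List.map_congr_left
      intro t _
      have hc : (PySem.List.count (x :: rest) t : Int)
          = (PySem.List.count rest t : Int) + (if t = x then 1 else 0) := by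
        simp only [PySem.List.count_eq, List.count_cons, beq_iff_eq]
        by_cases h : t = x
        · subst h; simp
        · simp [h, Ne.symm h]
      rw [hc]
      simp only [Prod.mk.injEq]
      refine ⟨?_, trivial⟩
      split_ifs with h <;> omega
    · have hpx : p < x := lt_of_le_of_ne (hge x List.mem_cons_self) (fun h => hxp h.symm)
      have hpnot : p ∉ x :: rest := by
        intro hmem
        rcases List.mem_cons.mp hmem with rfl | hmem
        · exact absurd rfl hxp
        · exact absurd (hx p hmem) (not_le_of_gt hpx)
      have hstep : tfB_step (acc, some p, k) x = (acc ++ [(k, p)], some x, 1) := by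
        simp [tfB_step, hxp]
      rw [List.foldl_cons, hstep, ih (acc ++ [(k, p)]) x 1 hrest hx,
        ofList_cons_not_mem p (x :: rest) hpnot]
      simp only [List.map_cons, List.append_assoc, List.singleton_append]
      congr 2
      · have hc : List.count p (x :: rest) = 0 := List.count_eq_zero.mpr hpnot
        simp [PySem.List.count_eq, hc]
      · apply List.map_congr_left
        intro t ht
        have htmem : t ∈ x :: rest := (PySem.Set.mem_ofList _ _).mp ht
        have htp : t ≠ p := fun h => hpnot (h ▸ htmem)
        have hc : (PySem.List.count (x :: rest) t : Int)
            = (PySem.List.count rest t : Int) + (if t = x then 1 else 0) := by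
          simp only [PySem.List.count_eq, List.count_cons, beq_iff_eq]
          by_cases h : t = x
          · subst h; simp
          · simp [h, Ne.symm h]
        rw [hc]
        simp only [Prod.mk.injEq, if_neg htp]
        refine ⟨?_, trivial⟩
        split_ifs with h <;> omega

-- B's grouping pass computes count/topic pairs for the distinct topics of the sorted cluster
lemma group_eq (c : List String) :
    tfB_group c
      = (PySem.Set.ofList (PySem.List.sorted c (fun x => x) false)).map
          (fun t => ((PySem.List.count (PySem.List.sorted c (fun x => x) false) t : Int), t)) := by
  unfold tfB_group
  generalize hs : PySem.List.sorted c (fun x => x) false = s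
  have hpw : s.Pairwise (fun a b => a ≤ b) := by
    rw [← hs]; exact PySem.List.sorted_pairwise c (fun x => x)
  cases s with
  | nil => rfl
  | cons p rest =>
    rcases List.pairwise_cons.mp hpw with ⟨hp, hrest⟩
    have hstep : tfB_step ([], none, 0) p = ([], some p, 1) := rfl
    rw [List.foldl_cons, hstep, grp_loop rest [] p 1 hrest hp]
    simp only [List.nil_append]
    apply List.map_congr_left
    intro t _
    have hc : (PySem.List.count (p :: rest) t : Int)
        = (PySem.List.count rest t : Int) + (if t = p then 1 else 0) := by
      simp only [PySem.List.count_eq, List.count_cons, beq_iff_eq]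
      by_cases h : t = p
      · subst h; simp
      · simp [h, Ne.symm h]
    rw [hc]
    simp only [Prod.mk.injEq]
    refine ⟨?_, trivial⟩
    split_ifs with h <;> omega

-- B's pair list is a permutation of A's pair list
lemma group_perm (c : List String) :
    (tfB_group c).Perm
      ((PySem.Set.ofList c).map (fun t => ((PySem.List.count c t : Int), t))) := by
  rw [group_eq]
  have hs : (PySem.List.sorted c (fun x => x) false).Perm c :=
    PySem.List.sorted_perm c (fun x => x) false
  have hfun : (fun t => ((PySem.List.count (PySem.List.sorted c (fun x => x) false) t : Int), t))
      = (fun t : String => ((PySem.List.count c t : Int), t)) := by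
    funext t
    simp only [PySem.List.count_eq]
    rw [hs.count_eq]
  rw [hfun]
  refine List.Perm.map _ ?_
  rw [List.perm_ext_iff_of_nodup (PySem.Set.nodup_ofList _) (PySem.Set.nodup_ofList _)]
  intro a
  rw [PySem.Set.mem_ofList, PySem.Set.mem_ofList, hs.mem_iff]

-- the per-cluster computations agree
lemma cluster_eq (acc : List (List String) × List (List Int)) (c : List String) :
    tfA_body acc c = tfB_body acc c := by
  unfold tfA_body tfB_body tfA_inner
  rw [PySem.List.foldl_pyRange_pyGetD c "" (tfA_step c) ([], []) le_rfl]
  simp only [Int.toNat_zero, List.drop_zero]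
  have hloop := loopA c c []
  simp only [List.map_nil] at hloop
  unfold tfA_step
  rw [hloop]
  have hS : c.foldl PySem.Set.add [] = PySem.Set.ofList c := rfl
  rw [hS]
  have hzip : ((PySem.Set.ofList c).map (fun t => (PySem.List.count c t : Int))).zip (PySem.Set.ofList c)
      = (PySem.Set.ofList c).map (fun t => ((PySem.List.count c t : Int), t)) := by
    generalize PySem.Set.ofList c = S
    induction S with
    | nil => rfl
    | cons x t ih => simp only [List.map_cons, List.zip_cons_cons, ih]
  rw [hzip]
  rw [sorted2_rev_eq_of_perm _ _ (group_perm c)]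
  rw [freq_eq (PySem.Set.ofList c) (fun t => (PySem.List.count c t : Int))]

-- ===== VERDICT (by name: the statement is the Claim_ definition above) =====
theorem topic_frequency_spec : Claim_equal_topic_frequency := by
  intro cl _
  unfold Spec_topic_frequency topic_frequency topic_frequency_alt
  rw [PySem.List.foldl_pyRange_pyGetD cl [] tfA_body ([], []) le_rfl]
  simp only [Int.toNat_zero, List.drop_zero]
  exact PySem.List.foldl_congr_mem cl tfA_body tfB_body ([], [])
    (fun acc c _ => cluster_eq acc c)
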